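-- pv_equiv track=rewrite | github.com/zigai/interfacy | interfacy/argparse_backend/argparser.py | _normalize_boolean_optional_flags
-- ===== SOURCE A (Python) =====
-- def _normalize_boolean_optional_flags(flags: tuple[str, ...]) -> tuple[str, ...]:
--     """
--     Normalize bool option strings for ``BooleanOptionalAction`` compatibility.
--
--     Python 3.14 rejects ``BooleanOptionalAction`` when all long flags already
--     start with ``--no-``. In that case, derive a positive base flag from the
--     first long option (e.g. ``--no-tokens`` -> ``--tokens``) and let argparse
--     generate the negative alias.
--     """
--     long_flags = [flag for flag in flags if flag.startswith("--")]
--     if not long_flags: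
--         return flags
--     if any(not flag.startswith("--no-") for flag in long_flags):
--         return flags
--
--     normalized: list[str] = []
--     replaced = False
--     for flag in flags:
--         if not replaced and flag.startswith("--no-") and len(flag) > len("--no-"):
--             normalized.append(f"--{flag[len('--no-') :]}")
--             replaced = True
--         else:
--             normalized.append(flag)
--     return tuple(normalized)
-- ===== SOURCE B (Python) =====
-- def _normalize_boolean_optional_flags(flags: tuple[str, ...]) -> tuple[str, ...]:
--     long_flags = [flag for flag in flags if flag.startswith("--")]
--     if not long_flags:
--         return flags
--     if any(not flag.startswith("--no-") for flag in long_flags):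
--         return flags
--     hit = next(
--         ((j, f) for j, f in enumerate(flags) if f.startswith("--no-") and len(f) > 5),
--         None,
--     )
--     if hit is None:
--         return flags
--     i, f = hit
--     return flags[:i] + (f"--{f[5:]}",) + flags[i + 1 :]
-- ===== Notes on version B (the rewrite author's own statement) =====
-- stated objective: simpler
-- what changed: Replaces the stateful rebuild loop with a 'replaced' boolean by locating the first qualifying '--no-' flag with next(enumerate(...)) and splicing the positive flag in with tuple slices.
import Mathlib
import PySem

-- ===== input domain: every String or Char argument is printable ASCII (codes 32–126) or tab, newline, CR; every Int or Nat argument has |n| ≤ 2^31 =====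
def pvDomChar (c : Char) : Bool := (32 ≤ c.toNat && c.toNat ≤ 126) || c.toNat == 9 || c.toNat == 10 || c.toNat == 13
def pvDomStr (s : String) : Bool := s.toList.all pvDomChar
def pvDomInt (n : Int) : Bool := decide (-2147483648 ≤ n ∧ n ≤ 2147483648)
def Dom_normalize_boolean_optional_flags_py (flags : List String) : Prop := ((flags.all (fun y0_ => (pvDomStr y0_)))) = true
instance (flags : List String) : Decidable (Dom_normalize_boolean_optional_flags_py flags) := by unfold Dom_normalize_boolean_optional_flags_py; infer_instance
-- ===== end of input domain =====

-- B replaces A's stateful rebuild loop (append + `replaced` flag) by finding the first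
-- qualifying '--no-' flag's index and splicing with slices; objective: simpler. Equivalence of return values.

-- ===== PORT A =====
-- the loop 'for flag in flags: ...' with its running (normalized, replaced) state;
-- len("--no-") is the constant 5
def pvLoopA : List String → Bool → List String
  | [], _ => []
  | f :: rest, replaced =>
    if !replaced && (PySem.Str.startswith f "--no-" && decide (5 < PySem.Str.len f)) then
      ("--" ++ PySem.Str.slice f (some 5) none) :: pvLoopA rest true
    else
      f :: pvLoopA rest replaced

def normalize_boolean_optional_flags_py (flags : List String) : List String :=
  let long_flags := flags.filter (fun f => PySem.Str.startswith f "--")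
  if long_flags.isEmpty then flags
  else if long_flags.any (fun f => !PySem.Str.startswith f "--no-") then flags
  else pvLoopA flags false

-- ===== PORT B =====
-- next(((j, f) for j, f in enumerate(flags) if ...), None)
def pvFindB : List String → Nat → Option (Nat × String)
  | [], _ => none
  | f :: rest, j =>
    if PySem.Str.startswith f "--no-" && decide (5 < PySem.Str.len f) then some (j, f)
    else pvFindB rest (j + 1)

def normalize_boolean_optional_flags_py_alt (flags : List String) : List String :=
  let long_flags := flags.filter (fun f => PySem.Str.startswith f "--")
  if long_flags.isEmpty then flags
  else if long_flags.any (fun f => !PySem.Str.startswith f "--no-") then flags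
  else
    match pvFindB flags 0 with
    | none => flags
    | some (i, f) =>
        PySem.List.slice flags none (some (i : Int))
          ++ ["--" ++ PySem.Str.slice f (some 5) none]
          ++ PySem.List.slice flags (some ((i : Int) + 1)) none

-- ===== PRECONDITION & SPEC =====
def Spec_normalize_boolean_optional_flags_py (flags : List String) (out : List String) : Prop := out = normalize_boolean_optional_flags_py_alt flags
instance (flags : List String) (out : List String) : Decidable (Spec_normalize_boolean_optional_flags_py flags out) := by unfold Spec_normalize_boolean_optional_flags_py; infer_instance

-- ===== CLAIM (what is proved, stated in full; the proofs are below) =====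
def Claim_equal_normalize_boolean_optional_flags_py : Prop := ∀ (flags : List String), Dom_normalize_boolean_optional_flags_py flags → Spec_normalize_boolean_optional_flags_py flags (normalize_boolean_optional_flags_py flags)

-- ===== LEMMAS AND PROOFS =====
theorem pvLoopA_true (l : List String) : pvLoopA l true = l := by
  induction l with
  | nil => rfl
  | cons f rest ih => simp [pvLoopA, ih]

theorem pvFindB_shift (l : List String) (j : Nat) :
    pvFindB l j = (pvFindB l 0).map (fun p => (p.1 + j, p.2)) := by
  induction l generalizing j with
  | nil => rfl
  | cons f rest ih =>
    simp only [pvFindB]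
    split_ifs with h
    · simp
    · rw [ih (j + 1), ih 1]
      cases pvFindB rest 0 with
      | none => rfl
      | some p => simp; omega

theorem pvLoopA_eq_splice (l : List String) :
    pvLoopA l false =
      match pvFindB l 0 with
      | none => l
      | some (i, f) => l.take i ++ ("--" ++ PySem.Str.slice f (some 5) none) :: l.drop (i + 1) := by
  induction l with
  | nil => rfl
  | cons f rest ih =>
    simp only [pvLoopA, pvFindB, Bool.not_false, Bool.true_and]
    split_ifs with h
    · simp [pvLoopA_true]
    · rw [ih, pvFindB_shift rest 1]
      cases pvFindB rest 0 with
      | none => rfl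
      | some p => dsimp only; simp [List.take_succ_cons, List.drop_succ_cons]

-- ===== VERDICT (by name: the statement is the Claim_ definition above) =====
theorem normalize_boolean_optional_flags_py_spec : Claim_equal_normalize_boolean_optional_flags_py := by
  intro flags _
  unfold Spec_normalize_boolean_optional_flags_py
  unfold normalize_boolean_optional_flags_py normalize_boolean_optional_flags_py_alt
  simp only []
  split_ifs with h1 h2
  · rfl
  · rfl
  · rw [pvLoopA_eq_splice]
    cases hf : pvFindB flags 0 with
    | none => rfl
    | some p =>
      obtain ⟨i, f⟩ := p
      dsimp only
      have hc : ((i : Int) + 1) = ((i + 1 : Nat) : Int) := by push_cast; ring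
      rw [hc, PySem.List.slice_to_natCast, PySem.List.slice_from_natCast]
      simp
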